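-- pv_equiv track=rewrite | github.com/Roboy/roboy_vision | src/face_detection.py | face_detected
-- ===== SOURCE A (Python) =====
-- FACE_AREA = 1500 # Face area for approx. 1.5m distance
--
-- def face_detected(bounding_boxes):
-- 	face_area = 0
-- 	for left, top, right, bottom in bounding_boxes:
-- 		tmp_face_area = (right-left) * (bottom-top)
-- 		if(tmp_face_area > face_area):
-- 			face_area = tmp_face_area
-- 	if(face_area > FACE_AREA):
-- 		return True
-- 	else:
-- 		return False
-- ===== SOURCE B (Python) =====
-- FACE_AREA = 1500 # Face area for approx. 1.5m distance
--
-- def face_detected(bounding_boxes):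
--     for left, top, right, bottom in bounding_boxes:
--         if (right-left)*(bottom-top) > FACE_AREA:
--             return True
--     return False
-- ===== Notes on version B (the rewrite author's own statement) =====
-- stated objective: simpler
-- what changed: Drops the running-max accumulator and final threshold comparison; instead tests each box's area directly against FACE_AREA and returns True at the first box exceeding it (early exit), False after the loop.
import Mathlib
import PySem

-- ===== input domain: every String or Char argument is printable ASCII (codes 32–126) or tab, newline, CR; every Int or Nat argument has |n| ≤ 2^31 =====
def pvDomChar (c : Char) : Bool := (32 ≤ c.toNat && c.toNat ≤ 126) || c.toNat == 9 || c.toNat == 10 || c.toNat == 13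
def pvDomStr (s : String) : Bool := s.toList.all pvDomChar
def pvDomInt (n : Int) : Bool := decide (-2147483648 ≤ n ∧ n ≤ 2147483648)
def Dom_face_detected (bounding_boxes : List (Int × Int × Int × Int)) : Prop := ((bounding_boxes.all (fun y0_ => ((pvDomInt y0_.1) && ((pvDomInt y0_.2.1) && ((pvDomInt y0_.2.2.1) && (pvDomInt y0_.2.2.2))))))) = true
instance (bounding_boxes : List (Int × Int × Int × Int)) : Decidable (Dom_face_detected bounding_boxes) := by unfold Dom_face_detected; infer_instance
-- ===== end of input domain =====

-- B drops A's running-max accumulator and final threshold comparison and instead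
-- returns True at the first box whose area exceeds FACE_AREA (early exit); simpler, same O(n).

def FACE_AREA : Int := 1500

-- ===== PORT A =====
def face_detected (bounding_boxes : List (Int × Int × Int × Int)) : Bool :=
  let face_area :=
    bounding_boxes.foldl (fun face_area b =>
      let (left, top, right, bottom) := b
      let tmp_face_area := (right - left) * (bottom - top)
      if tmp_face_area > face_area then tmp_face_area else face_area) 0
  if face_area > FACE_AREA then true else false

-- ===== PORT B =====
def face_detected_alt : List (Int × Int × Int × Int) → Bool
  | [] => false
  | (left, top, right, bottom) :: rest =>
      if (right - left) * (bottom - top) > FACE_AREA then true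
      else face_detected_alt rest

-- ===== PRECONDITION & SPEC =====
def Spec_face_detected (bounding_boxes : List (Int × Int × Int × Int)) (out : Bool) : Prop := out = face_detected_alt bounding_boxes
instance (bounding_boxes : List (Int × Int × Int × Int)) (out : Bool) : Decidable (Spec_face_detected bounding_boxes out) := by unfold Spec_face_detected; infer_instance

-- ===== CLAIM (what is proved, stated in full; the proofs are below) =====
def Claim_equal_face_detected : Prop := ∀ (bounding_boxes : List (Int × Int × Int × Int)), Dom_face_detected bounding_boxes → Spec_face_detected bounding_boxes (face_detected bounding_boxes)

-- ===== LEMMAS AND PROOFS =====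

-- the fold's accumulator never decreases
theorem fold_ge (l : List (Int × Int × Int × Int)) (acc : Int) :
    acc ≤ l.foldl (fun face_area b =>
      if (b.2.2.1 - b.1) * (b.2.2.2 - b.2.1) > face_area
      then (b.2.2.1 - b.1) * (b.2.2.2 - b.2.1) else face_area) acc := by
  induction l generalizing acc with
  | nil => simp
  | cons hd tl ih =>
    simp only [List.foldl_cons]
    split_ifs with h
    · exact le_trans (le_of_lt h) (ih _)
    · exact ih _

-- A's fold exceeds the threshold iff B's early-exit recursion finds a box over it
theorem fold_gt_iff_alt (l : List (Int × Int × Int × Int)) (acc : Int) (hacc : acc ≤ FACE_AREA) :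
    (decide (l.foldl (fun face_area b =>
      if (b.2.2.1 - b.1) * (b.2.2.2 - b.2.1) > face_area
      then (b.2.2.1 - b.1) * (b.2.2.2 - b.2.1) else face_area) acc > FACE_AREA))
    = face_detected_alt l := by
  induction l generalizing acc with
  | nil => simp [face_detected_alt]; omega
  | cons hd tl ih =>
    obtain ⟨left, top, right, bottom⟩ := hd
    simp only [List.foldl_cons, face_detected_alt]
    by_cases h2 : (right - left) * (bottom - top) > FACE_AREA
    · simp only [if_pos h2]
      have : acc < (right - left) * (bottom - top) := by omega
      simp only [if_pos this]
      have := fold_ge tl ((right - left) * (bottom - top))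
      simp only [decide_eq_true_eq]
      omega
    · simp only [if_neg h2]
      split_ifs with h
      · exact ih _ (by omega)
      · exact ih _ hacc

-- ===== VERDICT (by name: the statement is the Claim_ definition above) =====
theorem face_detected_spec : Claim_equal_face_detected := by
  intro bs _
  unfold Spec_face_detected face_detected
  have h := fold_gt_iff_alt bs 0 (by norm_num [FACE_AREA])
  rw [← h]
  by_cases hf : (bs.foldl (fun face_area b =>
      if (b.2.2.1 - b.1) * (b.2.2.2 - b.2.1) > face_area
      then (b.2.2.1 - b.1) * (b.2.2.2 - b.2.1) else face_area) 0 > FACE_AREA)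
  · simp [hf]
  · simp [hf]
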